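-- pv_equiv track=rewrite | github.com/and-stuber/fantastic-octo-spork | data_cleanup.py | limpa_palavras
-- ===== SOURCE A (Python) =====
-- def limpa_palavras(array_sem_letras, lista_de_palavras):
--     palavras_filtradas = []
--
--     for palavra in lista_de_palavras:
--         manter_palavra = True
--
--         for letra in array_sem_letras:
--             if letra in palavra:
--                 manter_palavra = False
--                 break
--         if manter_palavra:
--             palavras_filtradas.append(palavra)
--     return palavras_filtradas
-- ===== SOURCE B (Python) =====
-- def limpa_palavras(array_sem_letras, lista_de_palavras):
--     resultado = list(lista_de_palavras)
--     for letra in array_sem_letras: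
--         resultado = [p for p in resultado if letra not in p]
--     return resultado
-- ===== Notes on version B (the rewrite author's own statement) =====
-- stated objective: simpler
-- what changed: Inverted the loop nesting: instead of scanning each word against all forbidden entries with an early break, B keeps a shrinking candidate list and does one filter pass per forbidden entry.
import Mathlib
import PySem

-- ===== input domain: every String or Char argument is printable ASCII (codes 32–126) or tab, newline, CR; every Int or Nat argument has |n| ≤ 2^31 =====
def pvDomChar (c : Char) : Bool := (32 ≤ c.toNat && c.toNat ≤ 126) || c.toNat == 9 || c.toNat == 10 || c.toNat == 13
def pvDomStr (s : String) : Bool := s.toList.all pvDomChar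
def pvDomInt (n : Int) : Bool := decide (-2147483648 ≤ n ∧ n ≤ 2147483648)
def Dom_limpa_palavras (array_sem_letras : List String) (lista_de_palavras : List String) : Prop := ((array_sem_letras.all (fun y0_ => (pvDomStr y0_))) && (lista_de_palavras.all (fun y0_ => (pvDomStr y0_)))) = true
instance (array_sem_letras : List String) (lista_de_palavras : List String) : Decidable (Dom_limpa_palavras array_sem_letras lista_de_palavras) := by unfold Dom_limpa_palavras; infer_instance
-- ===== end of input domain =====

-- B inverts the loop nesting: one filter pass per forbidden entry over a shrinking candidate list (simpler decomposition, same cost).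


-- ===== PORT A =====
-- inner 'for letra in …: if letra in palavra: manter = False; break' as structural recursion on the entries
def pvManterA (array_sem_letras : List String) (palavra : String) : Bool :=
  match array_sem_letras with
  | [] => true
  | letra :: rest => if PySem.Str.isIn letra palavra then false else pvManterA rest palavra

def limpa_palavras (array_sem_letras : List String) (lista_de_palavras : List String) : List String :=
  lista_de_palavras.foldl
    (fun palavras_filtradas palavra =>
      if pvManterA array_sem_letras palavra then palavras_filtradas ++ [palavra]
      else palavras_filtradas) []

-- ===== PORT B =====
def limpa_palavras_alt (array_sem_letras : List String) (lista_de_palavras : List String) : List String :=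
  array_sem_letras.foldl
    (fun resultado letra => resultado.filter (fun p => !PySem.Str.isIn letra p))
    lista_de_palavras

-- ===== PRECONDITION & SPEC =====
def Spec_limpa_palavras (array_sem_letras : List String) (lista_de_palavras : List String) (out : List String) : Prop := out = limpa_palavras_alt array_sem_letras lista_de_palavras
instance (array_sem_letras : List String) (lista_de_palavras : List String) (out : List String) : Decidable (Spec_limpa_palavras array_sem_letras lista_de_palavras out) := by unfold Spec_limpa_palavras; infer_instance

-- ===== CLAIM (what is proved, stated in full; the proofs are below) =====
def Claim_equal_limpa_palavras : Prop := ∀ (array_sem_letras : List String) (lista_de_palavras : List String), Dom_limpa_palavras array_sem_letras lista_de_palavras → Spec_limpa_palavras array_sem_letras lista_de_palavras (limpa_palavras array_sem_letras lista_de_palavras)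

-- ===== LEMMAS AND PROOFS =====
-- A's inner loop is the conjunction of 'letra not in palavra' over the entries
theorem pvManterA_eq_all (letras : List String) (p : String) :
    pvManterA letras p = letras.all (fun l => !PySem.Str.isIn l p) := by
  induction letras with
  | nil => rfl
  | cons l t ih =>
    simp only [pvManterA, List.all_cons]
    cases h : PySem.Str.isIn l p <;> simp [ih]

-- B's sequence of filter passes is one filter by the conjunction
theorem alt_eq_filter (letras : List String) (lista : List String) :
    limpa_palavras_alt letras lista = lista.filter (fun p => letras.all (fun l => !PySem.Str.isIn l p)) := by
  induction letras generalizing lista with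
  | nil => simp [limpa_palavras_alt]
  | cons l t ih =>
    simp only [limpa_palavras_alt, List.foldl_cons] at *
    rw [ih]
    rw [List.filter_filter]
    apply List.filter_congr
    intro a _
    simp [Bool.and_comm]

-- ===== VERDICT (by name: the statement is the Claim_ definition above) =====
theorem limpa_palavras_spec : Claim_equal_limpa_palavras := by
  intro letras lista _
  unfold Spec_limpa_palavras limpa_palavras
  rw [alt_eq_filter]
  rw [PySem.List.foldl_append_if_eq_filter]
  simp only [List.nil_append]
  apply List.filter_congr
  intro a _
  exact pvManterA_eq_all letras a
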